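-- pv_equiv track=rewrite | github.com/jhkimoh/Robust-KGQA | utils.py | make_unique_rel_ent_dict
-- ===== SOURCE A (Python) =====
-- def make_unique_rel_ent_dict(not_id_temp_rel_ent_dict, outputs, rel_rank_dict):
--     from collections import defaultdict
--
--     value_to_keys = defaultdict(list)
--     for key, values in not_id_temp_rel_ent_dict.items():
--         for val in values:
--             value_to_keys[val].append(key)
--
--     from operator import itemgetter
--
--     value_to_best_key = {}
--     for val in outputs:
--         if val in value_to_keys:
--             keys = value_to_keys[val]
--             best_key = min(keys, key=lambda k: rel_rank_dict.get(k, float('inf')))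
--             value_to_best_key.setdefault(best_key, []).append(val)
--
--     return value_to_best_key
-- ===== SOURCE B (Python) =====
-- def make_unique_rel_ent_dict(not_id_temp_rel_ent_dict, outputs, rel_rank_dict):
--     # No inverted index: scan the dict directly for each output value.
--     value_to_best_key = {}
--     for val in outputs:
--         candidates = [k for k, vs in not_id_temp_rel_ent_dict.items() if val in vs]
--         if candidates:
--             best = min(candidates, key=lambda k: rel_rank_dict.get(k, float('inf')))
--             value_to_best_key.setdefault(best, []).append(val)
--     return value_to_best_key
-- ===== Notes on version B (the rewrite author's own statement) =====
-- stated objective: simpler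
-- what changed: B drops A's precomputed inverted index (value -> list of keys) entirely and instead, for each output value, scans the dict items directly in order to collect the candidate keys before taking the rank-minimal one.
import Mathlib
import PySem

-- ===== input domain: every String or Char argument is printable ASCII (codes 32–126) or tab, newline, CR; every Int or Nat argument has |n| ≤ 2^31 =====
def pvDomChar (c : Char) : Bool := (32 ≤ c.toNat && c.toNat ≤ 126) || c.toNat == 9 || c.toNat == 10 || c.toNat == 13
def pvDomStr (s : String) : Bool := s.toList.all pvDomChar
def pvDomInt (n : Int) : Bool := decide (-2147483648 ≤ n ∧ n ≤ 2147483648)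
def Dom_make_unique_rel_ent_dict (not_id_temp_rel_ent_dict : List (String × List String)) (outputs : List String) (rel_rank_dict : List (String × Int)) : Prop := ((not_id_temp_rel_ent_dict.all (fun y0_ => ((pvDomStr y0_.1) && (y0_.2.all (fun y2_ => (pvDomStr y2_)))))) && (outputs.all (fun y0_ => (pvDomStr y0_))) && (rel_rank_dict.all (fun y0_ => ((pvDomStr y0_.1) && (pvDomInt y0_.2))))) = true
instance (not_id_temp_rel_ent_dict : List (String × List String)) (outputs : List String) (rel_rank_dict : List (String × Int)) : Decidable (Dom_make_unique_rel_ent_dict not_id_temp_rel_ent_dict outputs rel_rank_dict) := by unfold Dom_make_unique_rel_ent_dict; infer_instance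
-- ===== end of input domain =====

-- B drops A's inverted index (value -> keys) and instead, for each output value, scans the
-- dict items directly for the keys whose value-list contains it; same return value.

-- rel_rank_dict.get(k, float('inf')): none plays float('inf') (no key's rank); exact here since
-- all ranks are Ints and inf compares greater than every Int
def pvRank (rel_rank_dict : List (String × Int)) (k : String) : Option Int :=
  (PySem.Dict.mk rel_rank_dict).get? k

-- strict < on ranks, none = +inf
def pvRankLt (a b : Option Int) : Bool :=
  match a, b with
  | none, _ => false
  | some _, none => true
  | some x, some y => decide (x < y)

def pvMinStep (rel_rank_dict : List (String × Int)) (acc : Option String) (k : String) : Option String :=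
  match acc with
  | none => some k
  | some b => if pvRankLt (pvRank rel_rank_dict k) (pvRank rel_rank_dict b) then some k else some b

-- min(keys, key=lambda k: rel_rank_dict.get(k, float('inf'))): first minimal element; none on []
def pvMinBy (rel_rank_dict : List (String × Int)) (ks : List String) : Option String :=
  ks.foldl (pvMinStep rel_rank_dict) none

-- ===== PORT A =====
def make_unique_rel_ent_dict (not_id_temp_rel_ent_dict : List (String × List String)) (outputs : List String) (rel_rank_dict : List (String × Int)) : List (String × List String) :=
  -- value_to_keys = defaultdict(list); for key, values in …: for val in values: value_to_keys[val].append(key)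
  let value_to_keys : PySem.Dict String (List String) :=
    not_id_temp_rel_ent_dict.foldl
      (fun d p => p.2.foldl (fun d v => d.modify v [] (fun l => l ++ [p.1])) d)
      PySem.Dict.empty
  let value_to_best_key : PySem.Dict String (List String) :=
    outputs.foldl
      (fun d val =>
        match value_to_keys.get? val with          -- if val in value_to_keys: keys = value_to_keys[val]
        | none => d
        | some keys =>
          match pvMinBy rel_rank_dict keys with    -- best_key = min(keys, key=…)
          | none => d                              -- unreachable: buckets are nonempty
          | some best_key => d.modify best_key [] (fun l => l ++ [val]))  -- setdefault(best,[]).append(val)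
      PySem.Dict.empty
  value_to_best_key.items

-- ===== PORT B =====
def make_unique_rel_ent_dict_alt (not_id_temp_rel_ent_dict : List (String × List String)) (outputs : List String) (rel_rank_dict : List (String × Int)) : List (String × List String) :=
  (outputs.foldl
    (fun d val =>
      -- candidates = [k for k, vs in not_id_temp_rel_ent_dict.items() if val in vs]
      let candidates : List String :=
        not_id_temp_rel_ent_dict.foldl
          (fun acc p => if val ∈ p.2 then acc ++ [p.1] else acc) []
      if candidates.isEmpty then d
      else
        match pvMinBy rel_rank_dict candidates with
        | none => d                                -- unreachable: candidates nonempty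
        | some best => d.modify best [] (fun l => l ++ [val]))  -- setdefault(best,[]).append(val)
    PySem.Dict.empty).items

-- ===== PRECONDITION & SPEC =====
def Spec_make_unique_rel_ent_dict (not_id_temp_rel_ent_dict : List (String × List String)) (outputs : List String) (rel_rank_dict : List (String × Int)) (out : List (String × List String)) : Prop := out = make_unique_rel_ent_dict_alt not_id_temp_rel_ent_dict outputs rel_rank_dict
instance (not_id_temp_rel_ent_dict : List (String × List String)) (outputs : List String) (rel_rank_dict : List (String × Int)) (out : List (String × List String)) : Decidable (Spec_make_unique_rel_ent_dict not_id_temp_rel_ent_dict outputs rel_rank_dict out) := by unfold Spec_make_unique_rel_ent_dict; infer_instance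

-- ===== CLAIM (what is proved, stated in full; the proofs are below) =====
def Claim_equal_make_unique_rel_ent_dict : Prop := ∀ (not_id_temp_rel_ent_dict : List (String × List String)) (outputs : List String) (rel_rank_dict : List (String × Int)), Dom_make_unique_rel_ent_dict not_id_temp_rel_ent_dict outputs rel_rank_dict → Spec_make_unique_rel_ent_dict not_id_temp_rel_ent_dict outputs rel_rank_dict (make_unique_rel_ent_dict not_id_temp_rel_ent_dict outputs rel_rank_dict)

-- ===== LEMMAS AND PROOFS =====

lemma pv_inner_getD (k val : String) (vs : List String) (d : PySem.Dict String (List String)) :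
    (vs.foldl (fun d v => d.modify v [] (fun l => l ++ [k])) d).getD val []
      = d.getD val [] ++ List.replicate (vs.count val) k := by
  induction vs generalizing d with
  | nil => simp
  | cons v vs ih =>
    rw [List.foldl_cons, ih, PySem.Dict.getD_modify]
    by_cases h : val = v
    · subst h; simp [List.replicate_succ]
    · simp [h, Ne.symm h]

lemma pv_outer_getD (items : List (String × List String)) (val : String)
    (d : PySem.Dict String (List String)) :
    (items.foldl (fun d p => p.2.foldl (fun d v => d.modify v [] (fun l => l ++ [p.1])) d) d).getD val []
      = d.getD val [] ++ items.flatMap (fun p => List.replicate (p.2.count val) p.1) := by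
  induction items generalizing d with
  | nil => simp
  | cons p items ih => rw [List.foldl_cons, ih, pv_inner_getD]; simp [List.append_assoc]

lemma pv_inner_contains (k val : String) (vs : List String) (d : PySem.Dict String (List String)) :
    (vs.foldl (fun d v => d.modify v [] (fun l => l ++ [k])) d).contains val
      = (d.contains val || decide (val ∈ vs)) := by
  induction vs generalizing d with
  | nil => simp
  | cons v vs ih =>
    rw [List.foldl_cons, ih, PySem.Dict.contains_modify]
    by_cases h : val = v <;> simp [h, Bool.or_comm, Bool.or_left_comm]

lemma pv_outer_contains (items : List (String × List String)) (val : String)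
    (d : PySem.Dict String (List String)) :
    (items.foldl (fun d p => p.2.foldl (fun d v => d.modify v [] (fun l => l ++ [p.1])) d) d).contains val
      = (d.contains val || decide (∃ p ∈ items, val ∈ p.2)) := by
  induction items generalizing d with
  | nil => simp
  | cons p items ih =>
    rw [List.foldl_cons, ih, pv_inner_contains]
    rw [Bool.eq_iff_iff]
    simp only [Bool.or_eq_true, decide_eq_true_eq, List.exists_mem_cons_iff]
    tauto

lemma pv_idx_get? (items : List (String × List String)) (val : String) :
    (items.foldl (fun d p => p.2.foldl (fun d v => d.modify v [] (fun l => l ++ [p.1])) d)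
        PySem.Dict.empty).get? val
      = (if ∃ p ∈ items, val ∈ p.2
          then some (items.flatMap (fun p => List.replicate (p.2.count val) p.1)) else none) := by
  by_cases hex : ∃ p ∈ items, val ∈ p.2
  · rw [if_pos hex]
    have hc : (items.foldl (fun d p => p.2.foldl (fun d v => d.modify v [] (fun l => l ++ [p.1])) d)
        PySem.Dict.empty).contains val = true := by
      rw [pv_outer_contains]; simp [hex]
    cases hg : (items.foldl (fun d p => p.2.foldl (fun d v => d.modify v [] (fun l => l ++ [p.1])) d)
        PySem.Dict.empty).get? val with
    | none =>
      rw [PySem.Dict.get?_eq_none_iff_contains] at hg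
      rw [hg] at hc; cases hc
    | some x =>
      have hD := pv_outer_getD items val PySem.Dict.empty
      rw [PySem.Dict.getD_eq_get?_getD, hg] at hD
      simp at hD
      rw [hD]
  · rw [if_neg hex]
    rw [PySem.Dict.get?_eq_none_iff_contains, pv_outer_contains]
    simp [hex]

lemma pv_G_nil_iff (items : List (String × List String)) (val : String) :
    items.flatMap (fun p => if val ∈ p.2 then [p.1] else []) = []
      ↔ ¬ ∃ p ∈ items, val ∈ p.2 := by
  rw [List.flatMap_eq_nil_iff]
  constructor
  · rintro h ⟨p, hp, hv⟩
    have := h p hp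
    rw [if_pos hv] at this
    cases this
  · intro h p hp
    rw [if_neg (fun hv => h ⟨p, hp, hv⟩)]

lemma pv_cand_eq (val : String) (items : List (String × List String)) (acc : List String) :
    items.foldl (fun acc p => if val ∈ p.2 then acc ++ [p.1] else acc) acc
      = acc ++ items.flatMap (fun p => if val ∈ p.2 then [p.1] else []) := by
  induction items generalizing acc with
  | nil => simp
  | cons p items ih =>
    rw [List.foldl_cons, List.flatMap_cons]
    by_cases h : val ∈ p.2 <;> simp [h, ih, List.append_assoc]

lemma pv_minstep_idem (rel : List (String × Int)) (acc : Option String) (k : String) :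
    pvMinStep rel (pvMinStep rel acc k) k = pvMinStep rel acc k := by
  cases acc with
  | none =>
    show pvMinStep rel (some k) k = some k
    simp only [pvMinStep]; split <;> rfl
  | some b =>
    by_cases h : pvRankLt (pvRank rel k) (pvRank rel b) = true
    · have h2 : pvMinStep rel (some b) k = some k := by simp [pvMinStep, h]
      rw [h2]
      show pvMinStep rel (some k) k = some k
      simp only [pvMinStep]; split <;> rfl
    · have h2 : pvMinStep rel (some b) k = some b := by simp [pvMinStep, h]
      rw [h2, h2]

lemma pv_fold_replicate (rel : List (String × Int)) (k : String) (n : ℕ) (acc : Option String) :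
    List.foldl (pvMinStep rel) acc (List.replicate n k)
      = if n = 0 then acc else pvMinStep rel acc k := by
  induction n generalizing acc with
  | zero => simp
  | succ n ih =>
    rw [List.replicate_succ, List.foldl_cons, ih]
    by_cases h : n = 0 <;> simp [h, pv_minstep_idem]

lemma pv_min_flat (rel : List (String × Int)) (val : String)
    (items : List (String × List String)) (acc : Option String) :
    List.foldl (pvMinStep rel) acc (items.flatMap (fun p => List.replicate (p.2.count val) p.1))
      = List.foldl (pvMinStep rel) acc (items.flatMap (fun p => if val ∈ p.2 then [p.1] else [])) := by
  induction items generalizing acc with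
  | nil => rfl
  | cons p items ih =>
    rw [List.flatMap_cons, List.flatMap_cons, List.foldl_append, List.foldl_append,
      pv_fold_replicate]
    by_cases h : val ∈ p.2
    · rw [if_pos h, if_neg (fun hc => (List.count_eq_zero.mp hc) h)]
      simp only [List.foldl_cons, List.foldl_nil]
      exact ih _
    · rw [if_neg h, if_pos (List.count_eq_zero.mpr h)]
      simp only [List.foldl_nil]
      exact ih _

-- ===== VERDICT (by name: the statement is the Claim_ definition above) =====
theorem make_unique_rel_ent_dict_spec : Claim_equal_make_unique_rel_ent_dict := by
  intro items outputs rel _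
  unfold Spec_make_unique_rel_ent_dict
  simp only [make_unique_rel_ent_dict, make_unique_rel_ent_dict_alt]
  congr 1
  apply List.foldl_ext
  intro d val _
  rw [pv_idx_get?, pv_cand_eq, List.nil_append]
  by_cases hex : ∃ p ∈ items, val ∈ p.2
  · rw [if_pos hex]
    have hG : (items.flatMap (fun p => if val ∈ p.2 then [p.1] else [])) ≠ [] :=
      fun h => ((pv_G_nil_iff items val).mp h) hex
    have hGe : ¬ ((items.flatMap (fun p => if val ∈ p.2 then [p.1] else [])).isEmpty = true) := by
      simp [hG]
    rw [if_neg hGe]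
    simp only [pvMinBy, pv_min_flat]
  · rw [if_neg hex]
    have hG : (items.flatMap (fun p => if val ∈ p.2 then [p.1] else [])) = [] :=
      (pv_G_nil_iff items val).mpr hex
    simp [hG]
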